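-- pv_equiv track=rewrite | github.com/white-richard/latent-space | repos/nested_learning/scripts/eval/summarize_eval.py | _expand_keys
-- ===== SOURCE A (Python) =====
-- from typing import Any, Dict, Iterable, List, Tuple
--
-- def _expand_keys(flat: Dict[str, float], keys: Iterable[str]) -> List[str]:
--     resolved: List[str] = []
--     for key in keys:
--         key = key.strip()
--         if not key:
--             continue
--         if key.endswith("*"):
--             prefix = key[:-1]
--             matches = sorted(k for k in flat.keys() if k.startswith(prefix))
--             resolved.extend(matches)
--         else:
--             resolved.append(key)
--     # De-duplicate while preserving order.
--     seen = set()
--     ordered: List[str] = []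
--     for k in resolved:
--         if k in seen:
--             continue
--         seen.add(k)
--         ordered.append(k)
--     return ordered
-- ===== SOURCE B (Python) =====
-- def _prefix_bound(sk, n, p, strict):
--     # First index i with sk[i][:n] >= p (strict) resp. sk[i][:n] > p (not strict),
--     # by binary search on the sorted list sk (truncation to n chars is monotone).
--     lo, hi = 0, len(sk)
--     while lo < hi:
--         mid = (lo + hi) // 2
--         t = sk[mid][:n]
--         if (t < p) if strict else (t <= p):
--             lo = mid + 1
--         else:
--             hi = mid
--     return lo
--
--
-- def _expand_keys(flat, keys):
--     # Sort the metric names once; each wildcard is resolved to a contiguous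
--     # range of the sorted list found by two binary searches, and the final
--     # order-preserving de-duplication is dict.fromkeys.
--     skeys = sorted(flat)
--     resolved = []
--     for key in keys:
--         key = key.strip()
--         if not key:
--             continue
--         if key.endswith("*"):
--             p = key[:-1]
--             n = len(p)
--             lo = _prefix_bound(skeys, n, p, True)
--             hi = _prefix_bound(skeys, n, p, False)
--             resolved.extend(skeys[lo:hi])
--         else:
--             resolved.append(key)
--     return list(dict.fromkeys(resolved))
-- ===== Notes on version B (the rewrite author's own statement) =====
-- stated objective: alternative
-- what changed: B sorts the dict's keys once and resolves each wildcard to a contiguous range of the sorted list found by two hand-written binary searches on the truncated keys (instead of A's per-wildcard linear filter plus sort of the matches), and de-duplicates with dict.fromkeys instead of A's explicit seen-set second pass; per-wildcard work drops from O(N log N) to O(log N + matches) at the price of one up-front O(N log N) sort, which is not measurably faster on the benchmark workload.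
import Mathlib
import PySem

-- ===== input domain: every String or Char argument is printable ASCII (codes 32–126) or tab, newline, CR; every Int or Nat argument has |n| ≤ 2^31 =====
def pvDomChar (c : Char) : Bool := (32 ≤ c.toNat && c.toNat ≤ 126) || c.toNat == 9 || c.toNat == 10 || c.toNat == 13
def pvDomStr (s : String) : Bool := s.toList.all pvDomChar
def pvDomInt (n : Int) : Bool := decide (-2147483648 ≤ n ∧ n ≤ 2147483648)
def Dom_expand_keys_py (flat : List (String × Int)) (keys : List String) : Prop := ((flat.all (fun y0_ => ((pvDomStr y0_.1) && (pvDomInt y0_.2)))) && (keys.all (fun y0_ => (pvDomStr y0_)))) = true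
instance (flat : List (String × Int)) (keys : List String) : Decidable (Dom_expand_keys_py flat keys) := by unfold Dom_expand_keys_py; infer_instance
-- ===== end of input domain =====

-- B resolves each wildcard to a contiguous range of the once-sorted key list found by
-- two binary searches (instead of A's per-wildcard filter-and-sort) and de-duplicates
-- with dict.fromkeys (instead of A's second seen-set pass).

-- ===== PORT A =====
-- the seen-set step 'if k in seen: continue; seen.add(k); ordered.append(k)' of A's dedup pass
def pvEmit (st : PySem.Set String × List String) (k : String) : PySem.Set String × List String :=
  if PySem.Set.contains st.1 k then st else (PySem.Set.add st.1 k, st.2 ++ [k])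

def expand_keys_py (flat : List (String × Int)) (keys : List String) : List String :=
  let resolved : List String := keys.foldl (fun resolved key =>
    let key := PySem.Str.strip key
    if key = "" then resolved
    else if PySem.Str.endswith key "*" then
      let pre := PySem.Str.slice key none (some (-1))
      let matched := PySem.List.sorted
        ((PySem.Dict.keys (PySem.Dict.mk flat)).filter (fun k => PySem.Str.startswith k pre)) (fun x => x) false
      resolved ++ matched
    else resolved ++ [key]) []
  (resolved.foldl pvEmit (PySem.Set.empty, [])).2

-- ===== PORT B =====
-- the while-loop of Source B's _prefix_bound (the temporaries mid = (lo+hi)//2 and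
-- t = sk[mid][:n] are written inline)
def pvBsLoop (sk : List String) (n : Int) (p : String) (strict : Bool) (lo hi : Int) : Int :=
  if _h : lo < hi then
    if (if strict
        then decide (PySem.Str.slice (PySem.List.pyGetD sk (PySem.Int.floordiv (lo + hi) 2) "") none (some n) < p)
        else decide (PySem.Str.slice (PySem.List.pyGetD sk (PySem.Int.floordiv (lo + hi) 2) "") none (some n) ≤ p)) then
      pvBsLoop sk n p strict (PySem.Int.floordiv (lo + hi) 2 + 1) hi
    else
      pvBsLoop sk n p strict lo (PySem.Int.floordiv (lo + hi) 2)
  else lo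
termination_by (hi - lo).toNat
decreasing_by
  all_goals
    have hb := PySem.Int.floordiv_two_mid_bounds (lo := lo) (hi := hi) (le_of_lt _h)
    have h2 : PySem.Int.floordiv (lo + hi) 2 < hi := by
      rw [PySem.Int.floordiv_lt_iff_lt_mul (by omega)]
      omega
    omega

-- Source B's _prefix_bound: first index i with sk[i][:n] >= p (strict) resp. sk[i][:n] > p
def pvPrefixBound (sk : List String) (n : Int) (p : String) (strict : Bool) : Int :=
  pvBsLoop sk n p strict 0 (sk.length : Int)

def expand_keys_py_alt (flat : List (String × Int)) (keys : List String) : List String :=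
  let skeys := PySem.List.sorted (PySem.Dict.keys (PySem.Dict.mk flat)) (fun x => x) false
  let resolved : List String := keys.foldl (fun resolved key =>
    let key := PySem.Str.strip key
    if key = "" then resolved
    else if PySem.Str.endswith key "*" then
      let p := PySem.Str.slice key none (some (-1))
      let n := PySem.Str.len p
      let lo := pvPrefixBound skeys n p true
      let hi := pvPrefixBound skeys n p false
      resolved ++ PySem.List.slice skeys (some lo) (some hi)
    else resolved ++ [key]) []
  PySem.List.dedup resolved

-- ===== PRECONDITION & SPEC =====
def Spec_expand_keys_py (flat : List (String × Int)) (keys : List String) (out : List String) : Prop := out = expand_keys_py_alt flat keys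
instance (flat : List (String × Int)) (keys : List String) (out : List String) : Decidable (Spec_expand_keys_py flat keys out) := by unfold Spec_expand_keys_py; infer_instance

-- ===== CLAIM (what is proved, stated in full; the proofs are below) =====
def Claim_equal_expand_keys_py : Prop := ∀ (flat : List (String × Int)) (keys : List String), Dom_expand_keys_py flat keys → Spec_expand_keys_py flat keys (expand_keys_py flat keys)

-- ===== LEMMAS AND PROOFS =====

-- B's binary-search comparison, as a predicate on an element of the sorted list
def pvPred (n : Int) (p : String) (strict : Bool) (x : String) : Bool :=
  if strict then decide (PySem.Str.slice x none (some n) < p)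
  else decide (PySem.Str.slice x none (some n) ≤ p)

-- lexicographic order on lists is monotone under truncation (< version)
theorem pvTakeLtMono {s t : List Char} (h : List.Lex (· < ·) s t) :
    ∀ n : Nat, List.Lex (· < ·) (s.take n) (t.take n) ∨ s.take n = t.take n := by
  induction h with
  | nil =>
    intro n
    cases n with
    | zero => exact Or.inr rfl
    | succ m => exact Or.inl List.Lex.nil
  | rel hab =>
    intro n
    cases n with
    | zero => exact Or.inr rfl
    | succ m => exact Or.inl (List.Lex.rel hab)
  | cons h ih =>
    intro n
    cases n with
    | zero => exact Or.inr rfl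
    | succ m =>
      rcases ih m with h' | h'
      · exact Or.inl (List.Lex.cons h')
      · exact Or.inr (by simp [List.take_succ_cons, h'])

-- ≤ version, on lists of characters
theorem pvTakeLeMono (s t : List Char) (n : Nat) (h : s ≤ t) : s.take n ≤ t.take n := by
  rcases lt_or_eq_of_le h with h1 | h1
  · have h2 : List.Lex (· < ·) s t := h1
    rcases pvTakeLtMono h2 n with h3 | h3
    · exact le_of_lt h3
    · exact le_of_eq h3
  · exact le_of_eq (by rw [h1])

-- Python string truncation s[:n] read off as a take on the character list
theorem pvTruncToList (x : String) (n : Int) (hn : 0 ≤ n) :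
    (PySem.Str.slice x none (some n)).toList = x.toList.take n.toNat := by
  rw [PySem.Str.toList_slice]
  exact PySem.List.slice_to _ hn

-- Python string truncation s[:n] is monotone for Python's string order
theorem pvTruncMono (x y : String) (n : Int) (hn : 0 ≤ n) (h : x ≤ y) :
    PySem.Str.slice x none (some n) ≤ PySem.Str.slice y none (some n) := by
  rw [String.le_iff_toList_le] at h ⊢
  rw [pvTruncToList _ _ hn, pvTruncToList _ _ hn]
  exact pvTakeLeMono _ _ _ h

-- the predicate is downward closed across indices of a sorted list
theorem pvPredDC (sk : List String) (n : Int) (p : String) (strict : Bool)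
    (hn : 0 ≤ n) (hs : sk.Pairwise (fun a b => a ≤ b))
    (i j : Nat) (hj : j < sk.length) (hij : i ≤ j)
    (hq : pvPred n p strict (sk[j]) = true) :
    pvPred n p strict (sk[i]'(lt_of_le_of_lt hij hj)) = true := by
  have hle : sk[i]'(lt_of_le_of_lt hij hj) ≤ sk[j] := by
    rcases Nat.lt_or_ge i j with hlt | hge
    · exact (List.pairwise_iff_getElem.mp hs) i j _ _ hlt
    · have hieq : i = j := le_antisymm hij hge
      subst hieq; exact le_rfl
  have htr := pvTruncMono _ _ n hn hle
  simp only [String.le_iff_toList_le] at htr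
  simp only [pysem] at htr
  unfold pvPred at hq ⊢
  cases strict with
  | true =>
    simp at hq ⊢
    exact lt_of_le_of_lt htr hq
  | false =>
    simp at hq ⊢
    exact le_trans htr hq

-- full characterisation of the binary-search loop's result
theorem pvBsLoop_spec (sk : List String) (n : Int) (p : String) (strict : Bool)
    (hn : 0 ≤ n) (hs : sk.Pairwise (fun a b => a ≤ b)) :
    ∀ (k : Nat) (lo hi : Int), (hi - lo).toNat = k → 0 ≤ lo → lo ≤ hi → hi ≤ (sk.length : Int) →
    (∀ i : Nat, (h : i < sk.length) → i < lo.toNat → pvPred n p strict sk[i] = true) →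
    (∀ i : Nat, (h : i < sk.length) → hi.toNat ≤ i → ¬ pvPred n p strict sk[i] = true) →
    lo ≤ pvBsLoop sk n p strict lo hi ∧ pvBsLoop sk n p strict lo hi ≤ hi ∧
    (∀ i : Nat, (h : i < sk.length) →
      (pvPred n p strict sk[i] = true ↔ i < (pvBsLoop sk n p strict lo hi).toNat)) := by
  intro k
  induction k using Nat.strong_induction_on with
  | _ k ih =>
    intro lo hi hk h0 hlh hhl hP hQ
    rw [pvBsLoop]
    by_cases h : lo < hi
    · rw [dif_pos h]
      have hb := PySem.Int.floordiv_two_mid_bounds (lo := lo) (hi := hi) (le_of_lt h)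
      set mid := PySem.Int.floordiv (lo + hi) 2 with hmid
      have hmidlt : mid < hi := by
        rw [hmid, PySem.Int.floordiv_lt_iff_lt_mul (by omega)]; omega
      have h0m : 0 ≤ mid := le_trans h0 hb.1
      have hmlen : mid < (sk.length : Int) := lt_of_lt_of_le hmidlt hhl
      have hmlen' : mid.toNat < sk.length := by omega
      have hget : PySem.List.pyGetD sk mid "" = sk[mid.toNat] :=
        PySem.List.pyGetD_eq_getElem sk "" h0m hmlen
      rw [hget]
      have hcond : (if strict
          then decide (PySem.Str.slice (sk[mid.toNat]'hmlen') none (some n) < p)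
          else decide (PySem.Str.slice (sk[mid.toNat]'hmlen') none (some n) ≤ p))
          = pvPred n p strict (sk[mid.toNat]'hmlen') := rfl
      rw [hcond]
      by_cases hc : pvPred n p strict (sk[mid.toNat]'hmlen') = true
      · rw [if_pos hc]
        have hrec := ih (hi - (mid + 1)).toNat (by omega) (mid + 1) hi rfl (by omega) (by omega) hhl
          (fun i hil hiu => pvPredDC sk n p strict hn hs i mid.toNat hmlen' (by omega) hc) hQ
        exact ⟨by omega, hrec.2.1, hrec.2.2⟩
      · rw [if_neg hc]
        have hrec := ih (mid - lo).toNat (by omega) lo mid rfl h0 hb.1 (le_of_lt hmlen) hP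
          (fun i hil hiu hqi =>
            hc (pvPredDC sk n p strict hn hs mid.toNat i hil (by omega) hqi))
        exact ⟨hrec.1, by omega, hrec.2.2⟩
    · rw [dif_neg h]
      have hlohi : lo = hi := le_antisymm hlh (not_lt.mp h)
      refine ⟨le_refl lo, le_of_eq hlohi, ?_⟩
      intro i hil
      constructor
      · intro hq
        by_contra hcon
        exact hQ i hil (by omega) hq
      · intro hilt
        exact hP i hil hilt

-- 'k.startswith(p)' is 'k[:len(p)] == p'
theorem pvStartswith_iff_trunc (x p : String) :
    PySem.Str.startswith x p = true ↔ PySem.Str.slice x none (some (PySem.Str.len p)) = p := by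
  have hn : (0:Int) ≤ PySem.Str.len p := by
    rw [PySem.Str.len_eq]; exact Int.natCast_nonneg _
  constructor
  · intro h
    rw [PySem.Str.startswith_eq] at h
    have h1 : p.toList <+: x.toList := (PySem.Chars.startswith_iff _ _).mp h
    have h2 : p.toList = x.toList.take p.toList.length := List.prefix_iff_eq_take.mp h1
    apply String.toList_inj.mp
    rw [pvTruncToList _ _ hn, PySem.Str.len_eq]
    simpa using h2.symm
  · intro h
    rw [PySem.Str.startswith_eq]
    apply (PySem.Chars.startswith_iff _ _).mpr
    apply List.prefix_iff_eq_take.mpr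
    have h1 := congrArg String.toList h
    rw [pvTruncToList _ _ hn, PySem.Str.len_eq] at h1
    simpa using h1.symm

-- a filter whose true-set is a contiguous index range is a drop-take slice
theorem pvFilter_eq_drop_take (l : List String) (q : String → Bool) (a b : Nat)
    (hab : a ≤ b) (hbl : b ≤ l.length)
    (hq : ∀ i : Nat, (h : i < l.length) → (q l[i] = true ↔ (a ≤ i ∧ i < b))) :
    l.filter q = (l.drop a).take (b - a) := by
  have hdecomp : l = l.take a ++ ((l.drop a).take (b - a) ++ l.drop b) := by
    have h1 : (l.drop a).take (b - a) ++ (l.drop a).drop (b - a) = l.drop a :=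
      List.take_append_drop _ _
    have h2 : (l.drop a).drop (b - a) = l.drop b := by
      rw [List.drop_drop]; congr 1; omega
    rw [h2] at h1
    rw [h1, List.take_append_drop]
  conv_lhs => rw [hdecomp]
  rw [List.filter_append, List.filter_append]
  have hfa : (l.take a).filter q = [] := by
    apply List.filter_eq_nil_iff.mpr
    intro x hx
    obtain ⟨i, hi, rfl⟩ := List.mem_iff_getElem.mp hx
    have hia : i < a := by
      have h3 := hi; rw [List.length_take] at h3; omega
    have hil : i < l.length := by omega
    rw [List.getElem_take]
    intro h'
    exact absurd ((hq i hil).mp h').1 (by omega)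
  have hfm : ((l.drop a).take (b - a)).filter q = (l.drop a).take (b - a) := by
    apply List.filter_eq_self.mpr
    intro x hx
    obtain ⟨i, hi, rfl⟩ := List.mem_iff_getElem.mp hx
    have hlen : i < b - a := by
      have h3 := hi
      rw [List.length_take, List.length_drop] at h3
      omega
    have hil : a + i < l.length := by omega
    rw [List.getElem_take, List.getElem_drop]
    exact (hq (a + i) hil).mpr ⟨by omega, by omega⟩
  have hfb : (l.drop b).filter q = [] := by
    apply List.filter_eq_nil_iff.mpr
    intro x hx
    obtain ⟨i, hi, rfl⟩ := List.mem_iff_getElem.mp hx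
    have hil : b + i < l.length := by
      have h3 := hi; rw [List.length_drop] at h3; omega
    rw [List.getElem_drop]
    intro h'
    exact absurd ((hq (b + i) hil).mp h').2 (by omega)
  rw [hfa, hfm, hfb]
  simp

-- the two binary searches bracket exactly the keys starting with p
theorem pvWild (xs : List String) (p : String) (hs : xs.Pairwise (fun a b => a ≤ b)) :
    PySem.List.slice xs (some (pvPrefixBound xs (PySem.Str.len p) p true))
      (some (pvPrefixBound xs (PySem.Str.len p) p false))
      = xs.filter (fun k => PySem.Str.startswith k p) := by
  have hn : (0:Int) ≤ PySem.Str.len p := by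
    rw [PySem.Str.len_eq]; exact Int.natCast_nonneg _
  set n := PySem.Str.len p with hndef
  have hspec1 := pvBsLoop_spec xs n p true hn hs (((xs.length : Int) - 0).toNat) 0 (xs.length : Int)
    rfl (le_refl 0) (Int.natCast_nonneg _) (le_refl _)
    (fun i h hlt => by omega) (fun i h hge => by intro _; omega)
  have hspec2 := pvBsLoop_spec xs n p false hn hs (((xs.length : Int) - 0).toNat) 0 (xs.length : Int)
    rfl (le_refl 0) (Int.natCast_nonneg _) (le_refl _)
    (fun i h hlt => by omega) (fun i h hge => by intro _; omega)
  obtain ⟨h1lo, h1hi, h1⟩ := hspec1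
  obtain ⟨h2lo, h2hi, h2⟩ := hspec2
  rw [show pvPrefixBound xs n p true = pvBsLoop xs n p true 0 (xs.length : Int) from rfl,
    show pvPrefixBound xs n p false = pvBsLoop xs n p false 0 (xs.length : Int) from rfl]
  set c1 := pvBsLoop xs n p true 0 (xs.length : Int) with hc1
  set c2 := pvBsLoop xs n p false 0 (xs.length : Int) with hc2
  have hc12 : c1 ≤ c2 := by
    by_contra hcon
    have hcon2 : c2 < c1 := lt_of_not_ge hcon
    have hlt : c2.toNat < xs.length := by omega
    have hq1 : pvPred n p true (xs[c2.toNat]) = true := (h1 c2.toNat hlt).mpr (by omega)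
    have hq2 : ¬ pvPred n p false (xs[c2.toNat]) = true := by
      intro h'; have h3 := (h2 c2.toNat hlt).mp h'; omega
    simp [pvPred] at hq1 hq2
    exact lt_asymm hq1 hq2
  have hchar : ∀ i : Nat, (h : i < xs.length) →
      ((fun k => PySem.Str.startswith k p) xs[i] = true ↔ (c1.toNat ≤ i ∧ i < c2.toNat)) := by
    intro i hil
    constructor
    · intro h
      have hpeq := (pvStartswith_iff_trunc xs[i] p).mp h
      rw [← hndef] at hpeq
      have hpeq2 : PySem.List.slice xs[i].toList none (some n) = p.toList := by
        simpa using congrArg String.toList hpeq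
      constructor
      · by_contra hcon
        have hcon2 : i < c1.toNat := Nat.lt_of_not_le hcon
        have hq1 : pvPred n p true (xs[i]) = true := (h1 i hil).mpr (by omega)
        simp [pvPred] at hq1
        rw [hpeq2] at hq1
        exact lt_irrefl p.toList hq1
      · apply (h2 i hil).mp
        simp [pvPred]
        exact le_of_eq hpeq2
    · intro hrange
      have hq2 : pvPred n p false (xs[i]) = true := (h2 i hil).mpr hrange.2
      have hq1 : ¬ pvPred n p true (xs[i]) = true := by
        intro h'; have h3 := (h1 i hil).mp h'; omega
      simp [pvPred] at hq1 hq2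
      have hres := (pvStartswith_iff_trunc xs[i] p).mpr
      rw [← hndef] at hres
      have hEq : (PySem.Str.slice xs[i] none (some n)).toList = p.toList := by
        simpa using le_antisymm hq2 hq1
      exact hres (String.toList_inj.mp hEq)
  rw [PySem.List.slice_toNat _ h1lo h2lo]
  rw [pvFilter_eq_drop_take xs _ c1.toNat c2.toNat (by omega) (by omega) hchar]

-- sorting the filtered list = filtering the sorted list
theorem pv_sorted_filter (xs : List String) (p : String → Bool) :
    PySem.List.sorted (xs.filter p) (fun x => x) false
      = (PySem.List.sorted xs (fun x => x) false).filter p := by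
  apply PySem.List.eq_of_perm_of_pairwise_le_of_injective (fun x : String => x)
    (fun _ _ h => h)
  · exact (PySem.List.sorted_perm _ _ _).trans
      ((PySem.List.sorted_perm xs _ _).filter p).symm
  · exact PySem.List.sorted_pairwise _ _
  · exact List.Pairwise.sublist List.filter_sublist (PySem.List.sorted_pairwise xs _)

-- per-key expansion segment, phrased with A's 'sort the matched keys' shape
def pvSeg (flat : List (String × Int)) (key : String) : List String :=
  if PySem.Str.strip key = "" then []
  else if PySem.Str.endswith (PySem.Str.strip key) "*" then
    PySem.List.sorted
      ((PySem.Dict.keys (PySem.Dict.mk flat)).filter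
        (fun k => PySem.Str.startswith k (PySem.Str.slice (PySem.Str.strip key) none (some (-1))))) (fun x => x) false
  else [PySem.Str.strip key]

-- A's outer loop builds the concatenation of the per-key segments
theorem pvA_resolved (flat : List (String × Int)) (keys : List String) :
    keys.foldl (fun resolved key =>
      if PySem.Str.strip key = "" then resolved
      else if PySem.Str.endswith (PySem.Str.strip key) "*" then
        resolved ++ PySem.List.sorted
          ((PySem.Dict.keys (PySem.Dict.mk flat)).filter
            (fun k => PySem.Str.startswith k (PySem.Str.slice (PySem.Str.strip key) none (some (-1))))) (fun x => x) false
      else resolved ++ [PySem.Str.strip key]) []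
      = keys.flatMap (pvSeg flat) := by
  have h : (fun (resolved : List String) key =>
      if PySem.Str.strip key = "" then resolved
      else if PySem.Str.endswith (PySem.Str.strip key) "*" then
        resolved ++ PySem.List.sorted
          ((PySem.Dict.keys (PySem.Dict.mk flat)).filter
            (fun k => PySem.Str.startswith k (PySem.Str.slice (PySem.Str.strip key) none (some (-1))))) (fun x => x) false
      else resolved ++ [PySem.Str.strip key])
      = (fun resolved key => resolved ++ pvSeg flat key) := by
    funext resolved key
    simp only [pvSeg]
    split_ifs <;> simp
  rw [h, PySem.List.foldl_append_eq_flatMap, List.nil_append]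

-- B's outer loop builds the same concatenation: each slice equals A's sorted filter
theorem pvB_resolved (flat : List (String × Int)) (keys : List String) :
    keys.foldl (fun resolved key =>
      if PySem.Str.strip key = "" then resolved
      else if PySem.Str.endswith (PySem.Str.strip key) "*" then
        resolved ++ PySem.List.slice (PySem.List.sorted (PySem.Dict.keys (PySem.Dict.mk flat)) (fun x => x) false)
          (some (pvPrefixBound (PySem.List.sorted (PySem.Dict.keys (PySem.Dict.mk flat)) (fun x => x) false)
            (PySem.Str.len (PySem.Str.slice (PySem.Str.strip key) none (some (-1))))
            (PySem.Str.slice (PySem.Str.strip key) none (some (-1))) true))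
          (some (pvPrefixBound (PySem.List.sorted (PySem.Dict.keys (PySem.Dict.mk flat)) (fun x => x) false)
            (PySem.Str.len (PySem.Str.slice (PySem.Str.strip key) none (some (-1))))
            (PySem.Str.slice (PySem.Str.strip key) none (some (-1))) false))
      else resolved ++ [PySem.Str.strip key]) []
      = keys.flatMap (pvSeg flat) := by
  have hseg : ∀ key : String,
      (if PySem.Str.strip key = "" then ([] : List String)
      else if PySem.Str.endswith (PySem.Str.strip key) "*" then
        PySem.List.slice (PySem.List.sorted (PySem.Dict.keys (PySem.Dict.mk flat)) (fun x => x) false)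
          (some (pvPrefixBound (PySem.List.sorted (PySem.Dict.keys (PySem.Dict.mk flat)) (fun x => x) false)
            (PySem.Str.len (PySem.Str.slice (PySem.Str.strip key) none (some (-1))))
            (PySem.Str.slice (PySem.Str.strip key) none (some (-1))) true))
          (some (pvPrefixBound (PySem.List.sorted (PySem.Dict.keys (PySem.Dict.mk flat)) (fun x => x) false)
            (PySem.Str.len (PySem.Str.slice (PySem.Str.strip key) none (some (-1))))
            (PySem.Str.slice (PySem.Str.strip key) none (some (-1))) false))
      else [PySem.Str.strip key]) = pvSeg flat key := by
    intro key
    simp only [pvSeg]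
    split_ifs with h1 h2
    · rfl
    · rw [pvWild _ _ (PySem.List.sorted_pairwise _ _), pv_sorted_filter]
    · rfl
  have h : (fun (resolved : List String) key =>
      if PySem.Str.strip key = "" then resolved
      else if PySem.Str.endswith (PySem.Str.strip key) "*" then
        resolved ++ PySem.List.slice (PySem.List.sorted (PySem.Dict.keys (PySem.Dict.mk flat)) (fun x => x) false)
          (some (pvPrefixBound (PySem.List.sorted (PySem.Dict.keys (PySem.Dict.mk flat)) (fun x => x) false)
            (PySem.Str.len (PySem.Str.slice (PySem.Str.strip key) none (some (-1))))
            (PySem.Str.slice (PySem.Str.strip key) none (some (-1))) true))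
          (some (pvPrefixBound (PySem.List.sorted (PySem.Dict.keys (PySem.Dict.mk flat)) (fun x => x) false)
            (PySem.Str.len (PySem.Str.slice (PySem.Str.strip key) none (some (-1))))
            (PySem.Str.slice (PySem.Str.strip key) none (some (-1))) false))
      else resolved ++ [PySem.Str.strip key])
      = (fun resolved key => resolved ++ pvSeg flat key) := by
    funext resolved key
    rw [← hseg key]
    split_ifs <;> simp
  rw [h, PySem.List.foldl_append_eq_flatMap, List.nil_append]

-- A's seen/ordered pass keeps the two components equal, so it is Set.ofList = dedup
theorem pvEmit_diag (l : List String) (s : PySem.Set String) :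
    (l.foldl pvEmit (s, s)).2 = l.foldl PySem.Set.add s := by
  induction l generalizing s with
  | nil => rfl
  | cons x xs ih =>
    simp only [List.foldl_cons]
    by_cases h : x ∈ s
    · have h1 : pvEmit (s, s) x = (s, s) := by simp [pvEmit, h]
      have h2 : PySem.Set.add s x = s := by simp [PySem.Set.add, h]
      rw [h1, h2, ih]
    · have h1 : pvEmit (s, s) x = (s ++ [x], s ++ [x]) := by simp [pvEmit, PySem.Set.add, h]
      have h2 : PySem.Set.add s x = s ++ [x] := by simp [PySem.Set.add, h]
      rw [h1, h2, ih]

theorem pvDedup (l : List String) :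
    (l.foldl pvEmit (PySem.Set.empty, [])).2 = PySem.List.dedup l := by
  have h := pvEmit_diag l PySem.Set.empty
  rw [PySem.List.dedup_eq_ofList, PySem.Set.ofList_eq_foldl]
  exact h

theorem pv_main (flat : List (String × Int)) (keys : List String) :
    expand_keys_py flat keys = expand_keys_py_alt flat keys := by
  simp only [expand_keys_py, expand_keys_py_alt]
  rw [pvA_resolved, pvB_resolved, pvDedup]

-- ===== VERDICT (by name: the statement is the Claim_ definition above) =====
theorem expand_keys_py_spec : Claim_equal_expand_keys_py := by
  intro flat keys _
  unfold Spec_expand_keys_py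
  exact pv_main flat keys
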